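-- pv_equiv track=rewrite | github.com/Koi725/Advanced-Job_tracker-py | utils/data_utils.py | filter_jobs_by_tag
-- ===== SOURCE A (Python) =====
-- def filter_jobs_by_tag(job_list, tags):
--     """
--     Filter job list by matching any of the user's tags in title or description.
--     """
--     filtered = []
--     for job in job_list:
--         combined_text = (
--             job.get("title", "") + " " + job.get("description", "")
--         ).lower()
--         if any(tag.lower() in combined_text for tag in tags):
--             filtered.append(job)
--     return filtered
-- ===== SOURCE B (Python) =====
-- def filter_jobs_by_tag(job_list, tags):
--     """Same filter, but lowercase the tags once and scan each job's text
--     position by position with a multi-pattern prefix test."""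
--     pats = [tag.lower() for tag in tags]
--
--     def hit(text):
--         for j in range(len(text) + 1):
--             rest = text[j:]
--             for p in pats:
--                 if rest.startswith(p):
--                     return True
--         return False
--
--     return [job for job in job_list
--             if hit((job.get("title", "") + " " + job.get("description", "")).lower())]
-- ===== Notes on version B (the rewrite author's own statement) =====
-- stated objective: alternative
-- what changed: A tests each lowered tag separately with Python's substring 'in' on every job; B lowers the tags once and makes a single left-to-right scan over each job's combined text, testing all patterns as prefixes at each position (a naive multi-pattern matcher).
import Mathlib
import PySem

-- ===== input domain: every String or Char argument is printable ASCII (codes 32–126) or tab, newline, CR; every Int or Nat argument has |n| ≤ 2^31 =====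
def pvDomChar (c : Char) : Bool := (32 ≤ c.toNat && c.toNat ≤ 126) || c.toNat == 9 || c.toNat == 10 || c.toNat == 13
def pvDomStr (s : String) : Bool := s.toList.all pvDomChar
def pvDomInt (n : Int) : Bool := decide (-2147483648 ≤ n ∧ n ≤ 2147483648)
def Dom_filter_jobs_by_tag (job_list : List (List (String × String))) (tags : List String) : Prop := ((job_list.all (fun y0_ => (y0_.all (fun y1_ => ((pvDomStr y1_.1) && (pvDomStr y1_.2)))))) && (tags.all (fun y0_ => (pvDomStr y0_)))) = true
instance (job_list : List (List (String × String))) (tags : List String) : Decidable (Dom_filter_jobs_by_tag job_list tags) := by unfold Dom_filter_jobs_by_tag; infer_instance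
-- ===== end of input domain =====

-- B lowers the tags once and scans each job's combined text position by position with a
-- multi-pattern prefix test, instead of A's per-tag substring test; same results (alternative).

-- ===== PORT A =====
-- combined_text = (job.get("title","") + " " + job.get("description","")).lower()
def pvCombinedA (job : List (String × String)) : List Char :=
  PySem.Chars.lower
    ((PySem.Dict.getD ⟨job⟩ "title" "").toList ++ [' '] ++
     (PySem.Dict.getD ⟨job⟩ "description" "").toList)

def filter_jobs_by_tag (job_list : List (List (String × String))) (tags : List String) :
    List (List (String × String)) :=
  job_list.foldl (fun filtered job =>
    let combined_text := pvCombinedA job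
    if tags.any (fun tag => PySem.Chars.isIn (PySem.Chars.lower tag.toList) combined_text)
    then filtered ++ [job] else filtered) []

-- ===== PORT B =====
-- hit(text): for j in range(len(text)+1): if any pattern is a prefix of text[j:], return True
def pvHit (pats : List (List Char)) (text : List Char) : Bool :=
  (PySem.List.pyRange 0 (text.length + 1) 1).any (fun j =>
    pats.any (fun p => PySem.Chars.startswith (text.drop j.toNat) p))

def filter_jobs_by_tag_alt (job_list : List (List (String × String))) (tags : List String) :
    List (List (String × String)) :=
  let pats := tags.map (fun tag => PySem.Chars.lower tag.toList)
  job_list.filter (fun job =>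
    pvHit pats (PySem.Chars.lower
      ((PySem.Dict.getD ⟨job⟩ "title" "").toList ++ [' '] ++
       (PySem.Dict.getD ⟨job⟩ "description" "").toList)))

-- ===== PRECONDITION & SPEC =====
def Spec_filter_jobs_by_tag (job_list : List (List (String × String))) (tags : List String) (out : List (List (String × String))) : Prop := out = filter_jobs_by_tag_alt job_list tags
instance (job_list : List (List (String × String))) (tags : List String) (out : List (List (String × String))) : Decidable (Spec_filter_jobs_by_tag job_list tags out) := by unfold Spec_filter_jobs_by_tag; infer_instance

-- ===== CLAIM (what is proved, stated in full; the proofs are below) =====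
def Claim_equal_filter_jobs_by_tag : Prop := ∀ (job_list : List (List (String × String))) (tags : List String), Dom_filter_jobs_by_tag job_list tags → Spec_filter_jobs_by_tag job_list tags (filter_jobs_by_tag job_list tags)

-- ===== LEMMAS AND PROOFS =====

-- B's position scan finds a pattern iff it is a substring of the text.
lemma pvHit_pat (p text : List Char) :
    ((PySem.List.pyRange 0 (text.length + 1) 1).any
      (fun j => PySem.Chars.startswith (text.drop j.toNat) p))
      = PySem.Chars.isIn p text := by
  rw [Bool.eq_iff_iff, List.any_eq_true, ← PySem.Chars.exists_prefix_drop_iff_isIn]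
  constructor
  · rintro ⟨j, _, hj⟩
    exact ⟨j.toNat, (PySem.Chars.startswith_iff _ _).1 hj⟩
  · rintro ⟨j, hj⟩
    by_cases h : j ≤ text.length
    · refine ⟨(j : Int), ?_, ?_⟩
      · rw [PySem.List.mem_pyRange_one]; omega
      · rw [PySem.Chars.startswith_iff]; simpa using hj
    · have hd : text.drop j = [] := List.drop_eq_nil_of_le (by omega)
      have hp : p = [] := List.eq_nil_of_prefix_nil (hd ▸ hj)
      refine ⟨(text.length : Int), ?_, ?_⟩
      · rw [PySem.List.mem_pyRange_one]; omega
      · rw [PySem.Chars.startswith_iff, hp]; exact List.nil_prefix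

-- exchanging two nested anys
lemma pvAnySwap {α β : Type} (a : List α) (b : List β) (h : α → β → Bool) :
    (a.any fun x => b.any (h x)) = (b.any fun y => a.any fun x => h x y) := by
  rw [Bool.eq_iff_iff]
  simp only [List.any_eq_true]; tauto

-- swap the two anys and β-reduce the mapped patterns
lemma pvHit_eq (tags : List String) (text : List Char) :
    pvHit (tags.map (fun tag => PySem.Chars.lower tag.toList)) text
      = tags.any (fun tag => PySem.Chars.isIn (PySem.Chars.lower tag.toList) text) := by
  unfold pvHit
  simp only [List.any_map, Function.comp_def]
  rw [pvAnySwap]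
  exact PySem.List.any_congr_mem (fun tag _ => pvHit_pat _ text)

-- ===== VERDICT (by name: the statement is the Claim_ definition above) =====
theorem filter_jobs_by_tag_spec : Claim_equal_filter_jobs_by_tag := by
  intro job_list tags _
  unfold Spec_filter_jobs_by_tag filter_jobs_by_tag filter_jobs_by_tag_alt
  rw [PySem.List.foldl_append_if]
  simp only [pvHit_eq, pvCombinedA, List.nil_append]
  simp
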